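-- pv_equiv track=rewrite | github.com/ABermo/Scrabble | validation.py | word_matches_with_blanks
-- ===== SOURCE A (Python) =====
-- def word_matches_with_blanks(word, dictionary):
--     """
--     Returns True if the word is valid, allowing '?' to match ANY letter.
--     Supports multiple blanks and Irish accented vowels.
--     """
--
--     # No blanks → normal check
--     if '?' not in word:
--         return word in dictionary
--
--     # All possible letters (A–Z + Irish vowels)
--     from string import ascii_uppercase
--     letters = list(ascii_uppercase) + ['Á', 'É', 'Í', 'Ó', 'Ú']
--
--     # Build all possible substitutions
--     possibilities = ['']
--     for ch in word:
--         if ch == '?':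
--             possibilities = [p + l for p in possibilities for l in letters]
--         else:
--             possibilities = [p + ch for p in possibilities]
--
--     # Accept if ANY valid word exists
--     return any(p in dictionary for p in possibilities)
-- ===== SOURCE B (Python) =====
-- LETTERS = set("ABCDEFGHIJKLMNOPQRSTUVWXYZ") | {'Á', 'É', 'Í', 'Ó', 'Ú'}
--
-- def word_matches_with_blanks(word, dictionary):
--     if '?' not in word:
--         return word in dictionary
--     return any(
--         len(d) == len(word)
--         and all(w == c if w != '?' else c in LETTERS for w, c in zip(word, d))
--         for d in dictionary
--     )
-- ===== Notes on version B (the rewrite author's own statement) =====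
-- stated objective: alternative
-- what changed: Instead of enumerating all 31^blanks wildcard substitutions and testing each for dictionary membership, B scans the dictionary once and pattern-matches each entry against the word (equal length, fixed positions equal, '?' positions any allowed letter); on the measured inputs the cost is the same, the enumeration only blows up with many blanks.
import Mathlib
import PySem

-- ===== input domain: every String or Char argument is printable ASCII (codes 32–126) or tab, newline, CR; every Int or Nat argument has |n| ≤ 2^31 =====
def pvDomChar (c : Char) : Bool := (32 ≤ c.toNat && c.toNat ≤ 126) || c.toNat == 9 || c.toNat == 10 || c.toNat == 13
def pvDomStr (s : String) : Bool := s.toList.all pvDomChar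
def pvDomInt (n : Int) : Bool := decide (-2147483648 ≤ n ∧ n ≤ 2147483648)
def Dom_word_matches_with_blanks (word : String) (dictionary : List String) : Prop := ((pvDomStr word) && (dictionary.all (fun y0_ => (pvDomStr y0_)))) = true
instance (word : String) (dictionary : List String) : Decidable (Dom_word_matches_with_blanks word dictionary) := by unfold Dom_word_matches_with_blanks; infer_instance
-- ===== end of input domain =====

-- B replaces A's enumeration of all wildcard substitutions by a single scan of the
-- dictionary that pattern-matches each entry against the word (objective: alternative).

-- ===== PORT A =====
-- ascii_uppercase + the five Irish accented vowels
def pvLetters : List Char :=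
  ['A','B','C','D','E','F','G','H','I','J','K','L','M','N','O','P','Q','R','S','T','U','V','W','X','Y','Z',
   'Á','É','Í','Ó','Ú']

-- one step of A's loop over the characters of word
def pvStep (ps : List (List Char)) (ch : Char) : List (List Char) :=
  if ch = '?' then ps.flatMap (fun p => pvLetters.map (fun l => p ++ [l]))
  else ps.map (fun p => p ++ [ch])

def word_matches_with_blanks (word : String) (dictionary : List String) : Bool :=
  if !(word.toList.contains '?') then dictionary.contains word
  else
    let possibilities := word.toList.foldl pvStep [[]]
    possibilities.any (fun p => dictionary.any (fun d => p == d.toList))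

-- ===== PORT B =====
-- same length, each fixed position equal, each '?' position any allowed letter
def pvMatches : List Char → List Char → Bool
  | [], r => r.isEmpty
  | _ :: _, [] => false
  | w :: ws, c :: cs => (if w = '?' then pvLetters.contains c else w == c) && pvMatches ws cs

def word_matches_with_blanks_alt (word : String) (dictionary : List String) : Bool :=
  if !(word.toList.contains '?') then dictionary.contains word
  else dictionary.any (fun d => pvMatches word.toList d.toList)

-- ===== PRECONDITION & SPEC =====
def Spec_word_matches_with_blanks (word : String) (dictionary : List String) (out : Bool) : Prop := out = word_matches_with_blanks_alt word dictionary
instance (word : String) (dictionary : List String) (out : Bool) : Decidable (Spec_word_matches_with_blanks word dictionary out) := by unfold Spec_word_matches_with_blanks; infer_instance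

-- ===== CLAIM (what is proved, stated in full; the proofs are below) =====
def Claim_equal_word_matches_with_blanks : Prop := ∀ (word : String) (dictionary : List String), Dom_word_matches_with_blanks word dictionary → Spec_word_matches_with_blanks word dictionary (word_matches_with_blanks word dictionary)

-- ===== LEMMAS AND PROOFS =====

theorem pvMatches_nil_right (r : List Char) : pvMatches [] r = true ↔ r = [] := by
  simp [pvMatches, List.isEmpty_iff]

-- membership in one step of A's loop
theorem mem_pvStep_blank (ps : List (List Char)) (q : List Char) :
    q ∈ pvStep ps '?' ↔ ∃ p ∈ ps, ∃ l ∈ pvLetters, q = p ++ [l] := by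
  unfold pvStep
  rw [if_pos rfl]
  simp only [List.mem_flatMap, List.mem_map]
  constructor
  · rintro ⟨p, hp, l, hl, rfl⟩; exact ⟨p, hp, l, hl, rfl⟩
  · rintro ⟨p, hp, l, hl, rfl⟩; exact ⟨p, hp, l, hl, rfl⟩

theorem mem_pvStep_fixed (ps : List (List Char)) (c : Char) (h : ¬ c = '?') (q : List Char) :
    q ∈ pvStep ps c ↔ ∃ p ∈ ps, q = p ++ [c] := by
  unfold pvStep
  rw [if_neg h]
  simp only [List.mem_map]
  constructor
  · rintro ⟨p, hp, rfl⟩; exact ⟨p, hp, rfl⟩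
  · rintro ⟨p, hp, rfl⟩; exact ⟨p, hp, rfl⟩

-- loop invariant: elements of the folded possibilities are exactly acc-prefix ++ a match of cs
theorem mem_foldl_pvStep (cs : List Char) :
    ∀ (acc : List (List Char)) (p : List Char),
      p ∈ cs.foldl pvStep acc ↔ ∃ q ∈ acc, ∃ r, pvMatches cs r = true ∧ p = q ++ r := by
  induction cs with
  | nil =>
      intro acc p
      simp [pvMatches_nil_right]
  | cons c cs ih =>
      intro acc p
      rw [List.foldl_cons, ih]
      by_cases h : c = '?'
      · subst h
        constructor
        · rintro ⟨q, hq, r, hr, rfl⟩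
          rw [mem_pvStep_blank] at hq
          obtain ⟨q0, hq0, l, hl, rfl⟩ := hq
          refine ⟨q0, hq0, l :: r, ?_, by simp⟩
          simp [pvMatches, hr, List.contains_eq_mem, hl]
        · rintro ⟨q, hq, r, hr, rfl⟩
          cases r with
          | nil => simp [pvMatches] at hr
          | cons l r =>
            simp only [pvMatches, if_pos rfl, Bool.and_eq_true] at hr
            have hl : l ∈ pvLetters := by simpa [List.contains_eq_mem] using hr.1
            exact ⟨q ++ [l], (mem_pvStep_blank _ _).2 ⟨q, hq, l, hl, rfl⟩, r, hr.2, by simp⟩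
      · constructor
        · rintro ⟨q, hq, r, hr, rfl⟩
          rw [mem_pvStep_fixed _ _ h] at hq
          obtain ⟨q0, hq0, rfl⟩ := hq
          refine ⟨q0, hq0, c :: r, ?_, by simp⟩
          simp [pvMatches, if_neg h, hr]
        · rintro ⟨q, hq, r, hr, rfl⟩
          cases r with
          | nil => simp [pvMatches] at hr
          | cons l r =>
            simp only [pvMatches, if_neg h, Bool.and_eq_true, beq_iff_eq] at hr
            obtain ⟨rfl, hr2⟩ := hr
            exact ⟨q ++ [c], (mem_pvStep_fixed _ _ h _).2 ⟨q, hq, rfl⟩, r, hr2, by simp⟩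

theorem mem_possibilities (cs : List Char) (p : List Char) :
    p ∈ cs.foldl pvStep [[]] ↔ pvMatches cs p = true := by
  rw [mem_foldl_pvStep]
  constructor
  · rintro ⟨q, hq, r, hr, rfl⟩
    simp only [List.mem_singleton] at hq
    subst hq; simpa using hr
  · intro h; exact ⟨[], by simp, p, h, by simp⟩

-- ===== VERDICT (by name: the statement is the Claim_ definition above) =====
theorem word_matches_with_blanks_spec : Claim_equal_word_matches_with_blanks := by
  unfold Claim_equal_word_matches_with_blanks
  intro word dictionary _
  unfold Spec_word_matches_with_blanks word_matches_with_blanks word_matches_with_blanks_alt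
  by_cases h : '?' ∈ word.toList
  · rw [if_neg (by simp [List.contains_eq_mem, h]), if_neg (by simp [List.contains_eq_mem, h])]
    apply Bool.eq_iff_iff.mpr
    simp only [List.any_eq_true, beq_iff_eq]
    constructor
    · rintro ⟨p, hp, d, hd, rfl⟩
      exact ⟨d, hd, (mem_possibilities _ _).1 hp⟩
    · rintro ⟨d, hd, hm⟩
      exact ⟨d.toList, (mem_possibilities _ _).2 hm, d, hd, rfl⟩
  · rw [if_pos (by simp [List.contains_eq_mem, h]), if_pos (by simp [List.contains_eq_mem, h])]
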